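-- pv_equiv track=rewrite | github.com/kotaro-kinoshita/yomitoku | src/yomitoku/utils/misc.py | convert_table_array_to_dict
-- ===== SOURCE A (Python) =====
-- def convert_table_array_to_dict(table_array, header_row=1):
--     n_cols = len(table_array[0])
--     n_rows = len(table_array)
--
--     header_cols = []
--     for i in range(n_cols):
--         header = []
--         for j in range(header_row):
--             header.append(table_array[j][i])
--
--         if len(header) > 0:
--             header_cols.append("_".join(header))
--         else:
--             header_cols.append(f"col_{i}")
--
--     table_dict = []
--     for i in range(header_row, n_rows):
--         row_dict = {}
--         for j in range(n_cols):
--             row_dict[header_cols[j]] = table_array[i][j]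
--         table_dict.append(row_dict)
--
--     return table_dict
-- ===== SOURCE B (Python) =====
-- def convert_table_array_to_dict(table_array, header_row=1):
--     n_cols = len(table_array[0])
--     out = []
--     headers = None
--     for idx, row in enumerate(table_array):
--         if idx < header_row:
--             cells = row[:n_cols]
--             headers = cells if headers is None else [
--                 h + "_" + c for h, c in zip(headers, cells)]
--         else:
--             if headers is None:
--                 headers = ["col_%d" % j for j in range(n_cols)]
--             out.append(dict(zip(headers, row)))
--     return out
-- ===== Notes on version B (the rewrite author's own statement) =====
-- stated objective: alternative
-- what changed: Replaces A's two staged index-driven passes (a column-outer loop that joins header cells per column, then a separate row loop assigning dict entries cell by cell) with a single streaming pass over enumerate(table_array) that carries a running headers accumulator: header rows are merged pairwise into the accumulator (h + '_' + c per column, no join and no column-outer loop) and each data row is emitted immediately as dict(zip(headers, row)).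
-- intended difference: For header_row < 0 (with a nonempty first row A still returns: -len <= header_row), A's range(header_row, n_rows) makes table_array[i] wrap around via negative indexing, so A returns the last |header_row| rows duplicated in front of every row of the table; B returns exactly one dict per table row with the col_{i} fallback headers, the intended 'no header rows' reading. — e.g. on convert_table_array_to_dict([["a"], ["b"]], -1): A returns [[("col_0", "b")], [("col_0", "a")], [("col_0", "b")]], B returns [[("col_0", "a")], [("col_0", "b")]]
import Mathlib
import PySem

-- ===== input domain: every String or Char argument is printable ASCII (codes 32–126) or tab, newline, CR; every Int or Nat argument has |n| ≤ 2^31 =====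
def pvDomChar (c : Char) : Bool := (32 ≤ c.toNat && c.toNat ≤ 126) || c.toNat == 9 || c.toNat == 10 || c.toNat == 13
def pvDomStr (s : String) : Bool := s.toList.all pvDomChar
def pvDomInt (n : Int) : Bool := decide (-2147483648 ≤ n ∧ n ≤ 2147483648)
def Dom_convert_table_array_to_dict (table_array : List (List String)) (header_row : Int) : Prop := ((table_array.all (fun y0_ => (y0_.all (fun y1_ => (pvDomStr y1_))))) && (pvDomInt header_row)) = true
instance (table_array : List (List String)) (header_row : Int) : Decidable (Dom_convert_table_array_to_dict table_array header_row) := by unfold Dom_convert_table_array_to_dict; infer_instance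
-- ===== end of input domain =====

-- B replaces A's two staged index-driven passes (column-outer header-join loop, then a row loop of
-- per-cell dict assignments) by ONE streaming pass over enumerate(table_array) that merges header
-- rows pairwise into a running key accumulator and emits dict(zip(...)) per data row; objective:
-- alternative (single pass with accumulator, no column-outer loop, no join). Return values only.

-- ===== PORT A =====
def convert_table_array_to_dict (table_array : List (List String)) (header_row : Int) : List (List (String × String)) :=
  let n_cols : Nat := ((PySem.List.pyGet? table_array 0).getD []).length
  let n_rows : Int := (table_array.length : Int)
  let header_cols : List String :=
    (List.range n_cols).foldl (fun acc (i : Nat) =>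
      let header : List String :=
        (PySem.List.pyRange 0 header_row 1).foldl (fun h j =>
          h ++ [PySem.List.pyGetD (PySem.List.pyGetD table_array j []) (i : Int) ""]) []
      acc ++ [if header.length > 0 then PySem.Str.join "_" header
              else "col_" ++ PySem.Int.toStr (i : Int)]) []
  (PySem.List.pyRange header_row n_rows 1).foldl (fun td i =>
    let row_dict : PySem.Dict String String :=
      (List.range n_cols).foldl (fun d j =>
        d.insert (header_cols.getD j "")
          (PySem.List.pyGetD (PySem.List.pyGetD table_array i []) (j : Int) "")) PySem.Dict.empty
    td ++ [row_dict.items]) []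

-- ===== PORT B =====
-- one step of B's single pass (state = (out, running headers)); transcribes the loop body of Source B
def pvBStep (header_row : Int) (n_cols : Nat)
    (st : List (List (String × String)) × Option (List String))
    (p : Int × List String) : List (List (String × String)) × Option (List String) :=
  if p.1 < header_row then
    let cells := PySem.List.slice p.2 none (some (n_cols : Int))
    (st.1, some (match st.2 with
      | none => cells
      | some hs => (hs.zip cells).map (fun hc => hc.1 ++ "_" ++ hc.2)))
  else
    let hs := match st.2 with
      | none => (List.range n_cols).map (fun (j : Nat) => "col_" ++ PySem.Int.toStr (j : Int))
      | some h => h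
    (st.1 ++ [(PySem.Dict.ofList (hs.zip p.2)).items], some hs)

def convert_table_array_to_dict_alt (table_array : List (List String)) (header_row : Int) : List (List (String × String)) :=
  let n_cols : Nat := ((PySem.List.pyGet? table_array 0).getD []).length
  ((PySem.List.enumerate table_array).foldl (pvBStep header_row n_cols) ([], none)).1

-- ===== PRECONDITION & SPEC =====
-- Pre_ is exactly A's return domain: A raises IndexError on the empty table, and, whenever the first
-- row is nonempty, on header_row outside [-len, len] or on any row shorter than the first row.
def Pre_convert_table_array_to_dict (table_array : List (List String)) (header_row : Int) : Prop :=
  table_array ≠ [] ∧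
    ((table_array.headD []).length = 0 ∨
      (-(table_array.length : Int) ≤ header_row ∧ header_row ≤ (table_array.length : Int) ∧
        ∀ row ∈ table_array, (table_array.headD []).length ≤ row.length))
instance (table_array : List (List String)) (header_row : Int) : Decidable (Pre_convert_table_array_to_dict table_array header_row) := by unfold Pre_convert_table_array_to_dict; infer_instance

def pvWitness_convert_table_array_to_dict : List (List String) × Int := ([["h1", "h2"], ["a", "b"]], 1)

-- For header_row < 0 (a value the function's contract never means), A's range(header_row, n_rows)
-- makes table_array[i] wrap around via Python negative indexing, so A returns the last |header_row|
-- rows again, prepended to every row of the table; B returns one dict per table row with the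
-- col_{i} fallback headers, which is the intended 'no header rows' reading.
def D_convert_table_array_to_dict (table_array : List (List String)) (header_row : Int) : Prop :=
  header_row < 0
instance (table_array : List (List String)) (header_row : Int) : Decidable (D_convert_table_array_to_dict table_array header_row) := by unfold D_convert_table_array_to_dict; infer_instance

def Spec_convert_table_array_to_dict (table_array : List (List String)) (header_row : Int) (out : List (List (String × String))) : Prop := ¬ D_convert_table_array_to_dict table_array header_row → out = convert_table_array_to_dict_alt table_array header_row
instance (table_array : List (List String)) (header_row : Int) (out : List (List (String × String))) : Decidable (Spec_convert_table_array_to_dict table_array header_row out) := by unfold Spec_convert_table_array_to_dict; infer_instance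

def pvDiffWitness_convert_table_array_to_dict : List (List String) × Int := ([["a"], ["b"]], -1)
def pvDiffWitnessOut_convert_table_array_to_dict : (List (List (String × String))) × (List (List (String × String))) :=
  ([[("col_0", "b")], [("col_0", "a")], [("col_0", "b")]], [[("col_0", "a")], [("col_0", "b")]])

-- ===== CLAIM (what is proved, stated in full; the proofs are below) =====
def Claim_unchanged_convert_table_array_to_dict : Prop := ∀ (table_array : List (List String)) (header_row : Int), Dom_convert_table_array_to_dict table_array header_row → Pre_convert_table_array_to_dict table_array header_row → Spec_convert_table_array_to_dict table_array header_row (convert_table_array_to_dict table_array header_row)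
def Claim_changed_convert_table_array_to_dict : Prop := Dom_convert_table_array_to_dict (pvDiffWitness_convert_table_array_to_dict.1) (pvDiffWitness_convert_table_array_to_dict.2) ∧ Pre_convert_table_array_to_dict (pvDiffWitness_convert_table_array_to_dict.1) (pvDiffWitness_convert_table_array_to_dict.2) ∧ D_convert_table_array_to_dict (pvDiffWitness_convert_table_array_to_dict.1) (pvDiffWitness_convert_table_array_to_dict.2) ∧ convert_table_array_to_dict (pvDiffWitness_convert_table_array_to_dict.1) (pvDiffWitness_convert_table_array_to_dict.2) = pvDiffWitnessOut_convert_table_array_to_dict.1 ∧ convert_table_array_to_dict_alt (pvDiffWitness_convert_table_array_to_dict.1) (pvDiffWitness_convert_table_array_to_dict.2) = pvDiffWitnessOut_convert_table_array_to_dict.2 ∧ pvDiffWitnessOut_convert_table_array_to_dict.1 ≠ pvDiffWitnessOut_convert_table_array_to_dict.2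
def Claim_exact_convert_table_array_to_dict : Prop := ∀ (table_array : List (List String)) (header_row : Int), Dom_convert_table_array_to_dict table_array header_row → Pre_convert_table_array_to_dict table_array header_row → D_convert_table_array_to_dict table_array header_row → convert_table_array_to_dict table_array header_row ≠ convert_table_array_to_dict_alt table_array header_row

-- ===== LEMMAS AND PROOFS =====

theorem pv_range_map_getD {α : Type} (l : List α) (m : Nat) (d : α) (hm : m ≤ l.length) :
    (List.range m).map (fun k => l.getD k d) = l.take m := by
  apply List.ext_getElem
  · simp [hm]
  · intro i h1 h2
    simp at h1 h2 ⊢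
    rw [List.getElem?_eq_getElem (by omega : i < l.length)]
    rfl

theorem pv_map_take {α β : Type} (l : List α) (m : Nat) (d : α) (hm : m ≤ l.length)
    (g : α → β) :
    (List.range m).map (fun k => g (l.getD k d)) = (l.take m).map g := by
  rw [← pv_range_map_getD l m d hm, List.map_map]
  rfl

theorem pv_zip_eq_range_map (l1 : List String) (l2 : List String) (hle : l1.length ≤ l2.length) :
    l1.zip l2 = (List.range l1.length).map (fun j => (l1.getD j "", l2.getD j "")) := by
  apply List.ext_getElem
  · simp; omega
  · intro i h1 h2
    simp only [List.getElem_zip, List.getElem_map, List.getElem_range]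
    simp at h1
    rw [List.getD_eq_getElem l1 "" (by omega), List.getD_eq_getElem l2 "" (by omega)]

theorem pv_join_step (a b : String) (t : List String) :
    PySem.Str.join "_" (a :: b :: t) = PySem.Str.join "_" ((a ++ "_" ++ b) :: t) := by
  unfold PySem.Str.join
  congr 1
  simp [PySem.Chars.join, List.intercalate]
  cases t <;> simp [List.intersperse]

theorem pv_join_foldl (a : String) (l : List String) :
    PySem.Str.join "_" (a :: l) = l.foldl (fun s c => s ++ "_" ++ c) a := by
  induction l generalizing a with
  | nil => unfold PySem.Str.join; simp [PySem.Chars.join, List.intercalate]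
  | cons b t ih => rw [pv_join_step, ih]; rfl

-- canonical common form of both programs on 0 ≤ header_row ≤ len (proof-only helper)
def pvCanon (table : List (List String)) (h : Int) : List (List (String × String)) :=
  let ncols := (table.headD []).length
  let hc := (List.range ncols).map (fun (i : Nat) =>
    if 1 ≤ h then PySem.Str.join "_" ((table.take h.toNat).map (fun r => r.getD i ""))
    else "col_" ++ PySem.Int.toStr (i : Int))
  (table.drop h.toNat).map (fun row =>
    ((List.range ncols).foldl (fun d j => d.insert (hc.getD j "") (row.getD j ""))
      PySem.Dict.empty).items)

theorem pv_A_eq_canon (table : List (List String)) (h : Int) (hne : table ≠ [])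
    (h0 : 0 ≤ h) (hh : h ≤ (table.length : Int))
    (hrows : ∀ row ∈ table, (table.headD []).length ≤ row.length) :
    convert_table_array_to_dict table h = pvCanon table h := by
  rcases table with _ | ⟨hd, tl⟩
  · exact absurd rfl hne
  have hrows' : ∀ row ∈ hd :: tl, hd.length ≤ row.length := by simpa using hrows
  unfold convert_table_array_to_dict pvCanon
  simp only [PySem.List.pyGet?_zero_cons, Option.getD_some, List.headD_cons,
    PySem.List.foldl_append_singleton_eq_map, List.nil_append, PySem.List.pyRange_one,
    Int.sub_zero, zero_add, List.map_map, Function.comp_def, PySem.List.pyGetD_natCast,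
    List.length_map, List.length_range]
  have hhdr :
      (List.map
        (fun (x : Nat) =>
          if h.toNat > 0 then
            PySem.Str.join "_"
              (List.map (fun x_1 => ((hd :: tl).getD x_1 []).getD x "") (List.range h.toNat))
          else "col_" ++ PySem.Int.toStr (x : Int))
        (List.range hd.length)) =
      (List.map
        (fun (i : Nat) =>
          if 1 ≤ h then
            PySem.Str.join "_" (List.map (fun r => r.getD i "") (List.take h.toNat (hd :: tl)))
          else "col_" ++ PySem.Int.toStr (i : Int))
        (List.range hd.length)) := by
    apply List.map_congr_left
    intro i _
    by_cases h1 : 1 ≤ h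
    · rw [if_pos (by omega : h.toNat > 0), if_pos h1]
      congr 1
      exact pv_map_take (hd :: tl) h.toNat [] (by omega) (fun r => r.getD i "")
    · rw [if_neg (by omega : ¬ h.toNat > 0), if_neg h1]
  rw [hhdr]
  apply List.ext_getElem
  · simp
    omega
  · intro i hi1 hi2
    simp only [List.getElem_map, List.getElem_range, List.getElem_drop]
    have hi1' : (i : Int) < (tl.length : Int) + 1 - h := by simpa using hi1
    have hidx : (h + (i : Int)).toNat = h.toNat + i := by omega
    have hx : PySem.List.pyGetD (hd :: tl) (h + (i : Int)) [] = (hd :: tl)[h.toNat + i]'(by simp; omega) := by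
      rw [PySem.List.pyGetD_eq_getElem (hd :: tl) [] (by omega) (by simp; omega)]
      simp only [hidx]
    simp only [hx]

-- B's pass over rows whose indices are all ≥ header_row, running headers present: emits one dict per row
theorem pv_fold_data (h : Int) (n : Nat) (rows : List (List String)) (s : Int)
    (out : List (List (String × String))) (hs : List String)
    (hge : ∀ k : Nat, k < rows.length → ¬ (s + (k : Int) < h)) :
    (PySem.List.enumerate rows s).foldl (pvBStep h n) (out, some hs) =
      (out ++ rows.map (fun row => (PySem.Dict.ofList (hs.zip row)).items), some hs) := by
  induction rows generalizing s out with
  | nil => simp [PySem.List.enumerate_nil]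
  | cons r rs ih =>
      rw [PySem.List.enumerate_cons, List.foldl_cons]
      have h0 : ¬ (s < h) := by simpa using hge 0 (by simp)
      show (PySem.List.enumerate rs (s+1)).foldl (pvBStep h n) (pvBStep h n (out, some hs) (s, r)) = _
      rw [show pvBStep h n (out, some hs) (s, r)
            = (out ++ [(PySem.Dict.ofList (hs.zip r)).items], some hs) by
          unfold pvBStep; rw [if_neg h0]]
      rw [ih (s+1) _ (by intro k hk; have := hge (k+1) (by simpa using hk); push_cast at this ⊢; omega)]
      simp

-- B's pass over header rows (indices all < header_row): merges columns into the running accumulator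
theorem pv_fold_header (h : Int) (n : Nat) (rows : List (List String)) (s : Int)
    (out : List (List (String × String))) (hs : List String) (hlen : hs.length = n)
    (hlt : ∀ k : Nat, k < rows.length → s + (k : Int) < h)
    (hrl : ∀ r ∈ rows, n ≤ r.length) :
    (PySem.List.enumerate rows s).foldl (pvBStep h n) (out, some hs) =
      (out, some ((List.range n).map (fun i =>
        rows.foldl (fun acc r => acc ++ "_" ++ r.getD i "") (hs.getD i "")))) := by
  induction rows generalizing s hs with
  | nil =>
      simp only [PySem.List.enumerate_nil, List.foldl_nil]
      congr 2
      apply List.ext_getElem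
      · simp [hlen]
      · intro i hi1 hi2
        simp only [List.getElem_map, List.getElem_range]
        rw [List.getD_eq_getElem hs "" (by simpa using hi1)]
  | cons r rs ih =>
      rw [PySem.List.enumerate_cons, List.foldl_cons]
      have h0 : s < h := by simpa using hlt 0 (by simp)
      have hrn : n ≤ r.length := hrl r (by simp)
      have hcells : PySem.List.slice r none (some (n : Int)) = r.take n :=
        PySem.List.slice_to_natCast r n
      have hstep : pvBStep h n (out, some hs) (s, r)
          = (out, some ((List.range n).map (fun i => hs.getD i "" ++ "_" ++ r.getD i ""))) := by
        unfold pvBStep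
        rw [if_pos h0]
        simp only [hcells]
        congr 2
        apply List.ext_getElem
        · simp [hlen]; omega
        · intro i hi1 hi2
          simp only [List.getElem_map, List.getElem_zip, List.getElem_range]
          have hi : i < n := by simp [hlen] at hi1; omega
          rw [List.getD_eq_getElem hs "" (by omega),
            List.getD_eq_getElem r "" (by omega)]
          simp [List.getElem_take]
      show (PySem.List.enumerate rs (s+1)).foldl (pvBStep h n) (pvBStep h n (out, some hs) (s, r)) = _
      rw [hstep, ih (s+1) ((List.range n).map (fun i => hs.getD i "" ++ "_" ++ r.getD i ""))
        (by simp) (by intro k hk; have := hlt (k+1) (by simpa using hk); push_cast at this ⊢; omega)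
        (by intro x hx; exact hrl x (by simp [hx]))]
      congr 2
      apply List.map_congr_left
      intro i hi
      simp only [List.mem_range] at hi
      rw [List.getD_eq_getElem _ "" (by simpa using hi)]
      simp

theorem pv_B_eq_canon (table : List (List String)) (h : Int) (hne : table ≠ [])
    (h0 : 0 ≤ h) (hh : h ≤ (table.length : Int))
    (hrows : ∀ row ∈ table, (table.headD []).length ≤ row.length) :
    convert_table_array_to_dict_alt table h = pvCanon table h := by
  rcases table with _ | ⟨hd, tl⟩
  · exact absurd rfl hne
  have hrows' : ∀ row ∈ hd :: tl, hd.length ≤ row.length := by simpa using hrows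
  unfold convert_table_array_to_dict_alt pvCanon
  simp only [PySem.List.pyGet?_zero_cons, Option.getD_some, List.headD_cons]
  by_cases h1 : 1 ≤ h
  · -- header rows = take h.toNat (nonempty), data rows = drop h.toNat
    obtain ⟨m, hm⟩ : ∃ m, h.toNat = m + 1 := ⟨h.toNat - 1, by omega⟩
    have hmlen : m ≤ tl.length := by simp at hh; omega
    have htk : (hd :: tl).take h.toNat = hd :: tl.take m := by rw [hm]; rfl
    rw [show PySem.List.enumerate (hd :: tl) 0
          = PySem.List.enumerate ((hd :: tl).take h.toNat) 0
            ++ PySem.List.enumerate ((hd :: tl).drop h.toNat)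
                (0 + (((hd :: tl).take h.toNat).length : Int)) from by
        rw [← PySem.List.enumerate_append, List.take_append_drop]]
    rw [List.foldl_append, htk, PySem.List.enumerate_cons, List.foldl_cons]
    simp only [zero_add]
    rw [show (((hd :: tl.take m).length : Int)) = h from by
      simp; push_cast; omega]
    have hstep0 : pvBStep h hd.length (([], none)) ((0 : Int), hd) = ([], some hd) := by
      unfold pvBStep
      rw [if_pos (show (0:Int) < h by omega)]
      simp [PySem.List.slice_to_natCast]
    rw [hstep0]
    rw [pv_fold_header h hd.length (tl.take m) 1 [] hd rfl
      (by intro k hk; simp only [List.length_take, lt_min_iff] at hk; push_cast; omega)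
      (by intro x hx; exact hrows' x (by simp [List.mem_of_mem_take hx]))]
    rw [pv_fold_data h hd.length ((hd :: tl).drop h.toNat) h []
      ((List.range hd.length).map (fun i =>
        (tl.take m).foldl (fun acc r => acc ++ "_" ++ r.getD i "") (hd.getD i "")))
      (by intro k hk; push_cast; omega)]
    simp only [List.nil_append]
    -- identify the accumulated headers with canon's header list
    have hhc : (List.range hd.length).map (fun i =>
        (tl.take m).foldl (fun acc r => acc ++ "_" ++ r.getD i "") (hd.getD i ""))
      = (List.range hd.length).map (fun (i : Nat) =>
        if 1 ≤ h then PySem.Str.join "_" ((hd :: tl.take m).map (fun r => r.getD i ""))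
        else "col_" ++ PySem.Int.toStr (i : Int)) := by
      apply List.map_congr_left
      intro i _
      rw [if_pos h1]
      simp only [List.map_cons]
      rw [pv_join_foldl, List.foldl_map]
    rw [hhc]
    apply List.map_congr_left
    intro row hrow
    have hrl : hd.length ≤ row.length := hrows' row (List.mem_of_mem_drop hrow)
    congr 1
    unfold PySem.Dict.ofList PySem.Dict.update
    rw [pv_zip_eq_range_map _ row (by simpa using hrl)]
    simp only [List.length_map, List.length_range]
    rw [List.foldl_map]
  · -- h = 0: every row is a data row, headers fall back to col_{i}
    have hz : h = 0 := by omega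
    subst hz
    rw [PySem.List.enumerate_cons, List.foldl_cons]
    have hstep0 : pvBStep 0 hd.length (([], none)) ((0 : Int), hd)
        = ([(PySem.Dict.ofList ((((List.range hd.length).map (fun (j : Nat) => "col_" ++ PySem.Int.toStr (j : Int)))).zip hd)).items],
           some ((List.range hd.length).map (fun (j : Nat) => "col_" ++ PySem.Int.toStr (j : Int)))) := by
      unfold pvBStep
      rw [if_neg (by omega : ¬ (0:Int) < 0)]
      rfl
    rw [hstep0]
    rw [pv_fold_data 0 hd.length tl (0+1) _ _ (by intro k hk; push_cast; omega)]
    simp only [Int.toNat_zero, List.take_zero, List.drop_zero, List.map_cons,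
      if_neg (show ¬ (1:Int) ≤ 0 by omega)]
    rw [List.singleton_append]
    congr 1
    · congr 1
      unfold PySem.Dict.ofList PySem.Dict.update
      rw [pv_zip_eq_range_map _ hd (by simp)]
      simp only [List.length_map, List.length_range]
      rw [List.foldl_map]
    · apply List.map_congr_left
      intro row hrow
      have hrl : hd.length ≤ row.length := hrows' row (by simp [hrow])
      congr 1
      unfold PySem.Dict.ofList PySem.Dict.update
      rw [pv_zip_eq_range_map _ row (by simpa using hrl)]
      simp only [List.length_map, List.length_range]
      rw [List.foldl_map]

theorem convert_table_array_to_dict_spec : Claim_unchanged_convert_table_array_to_dict := by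
  intro table h _ hpre
  unfold Spec_convert_table_array_to_dict D_convert_table_array_to_dict
  intro hD
  have h0 : 0 ≤ h := by omega
  obtain ⟨hne, hcase⟩ := hpre
  by_cases hh : h ≤ (table.length : Int)
  · have hrows : ∀ row ∈ table, (table.headD []).length ≤ row.length := by
      rcases hcase with h1 | ⟨_, _, h3⟩
      · intro row _; omega
      · exact h3
    rw [pv_A_eq_canon table h hne h0 hh hrows, pv_B_eq_canon table h hne h0 hh hrows]
  · -- h > len: Pre_ forces an empty first row; both sides return []
    have hnc : (table.headD []).length = 0 := by
      rcases hcase with h1 | ⟨_, h2, _⟩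
      · exact h1
      · omega
    rcases table with _ | ⟨hd, tl⟩
    · exact absurd rfl hne
    have hhd : hd = [] := by
      simp only [List.headD_cons] at hnc
      exact List.eq_nil_of_length_eq_zero hnc
    subst hhd
    -- A returns []
    rw [show convert_table_array_to_dict ([] :: tl) h = [] by
      unfold convert_table_array_to_dict
      simp only [PySem.List.pyGet?_zero_cons, Option.getD_some, List.length_nil,
        List.range_zero, List.foldl_nil]
      rw [PySem.List.pyRange_one_eq_nil (by simp only [List.length_cons] at hh ⊢; push_cast at hh ⊢; omega)]
      rfl]
    -- B: every index 0..len-1 is < h, so all rows are header rows and out stays []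
    unfold convert_table_array_to_dict_alt
    simp only [PySem.List.pyGet?_zero_cons, Option.getD_some, List.length_nil]
    rw [PySem.List.enumerate_cons, List.foldl_cons]
    have hstep0 : pvBStep h 0 (([], none)) ((0 : Int), ([] : List String)) = ([], some []) := by
      unfold pvBStep
      rw [if_pos (by simp only [List.length_cons] at hh; push_cast at hh; omega : (0:Int) < h)]
      rfl
    rw [hstep0]
    rw [pv_fold_header h 0 tl (0+1) [] [] rfl
      (by intro k hk; simp only [List.length_cons] at hh; push_cast at hh ⊢; omega)
      (by intro x _; omega)]

theorem convert_table_array_to_dict_changed : Claim_changed_convert_table_array_to_dict := by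
  unfold Claim_changed_convert_table_array_to_dict; decide

-- B emits one dict per table row; for header_row < 0 A emits len - header_row of them, so they differ
theorem pv_B_len (table : List (List String)) (h : Int) (hneg : h < 0) (n : Nat) :
    ((PySem.List.enumerate table).foldl (pvBStep h n) ([], none)).1.length = table.length := by
  rcases table with _ | ⟨hd, tl⟩
  · simp [PySem.List.enumerate_nil]
  rw [PySem.List.enumerate_cons, List.foldl_cons]
  have hstep0 : pvBStep h n (([], none)) ((0 : Int), hd)
      = ([(PySem.Dict.ofList ((((List.range n).map (fun (j : Nat) => "col_" ++ PySem.Int.toStr (j : Int)))).zip hd)).items],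
         some ((List.range n).map (fun (j : Nat) => "col_" ++ PySem.Int.toStr (j : Int)))) := by
    unfold pvBStep
    rw [if_neg (by omega : ¬ (0:Int) < h)]
    rfl
  rw [hstep0, pv_fold_data h n tl (0+1) _ _ (by intro k hk; push_cast; omega)]
  simp

theorem convert_table_array_to_dict_tight : Claim_exact_convert_table_array_to_dict := by
  intro table h _ hpre hD heq
  unfold D_convert_table_array_to_dict at hD
  have hlen := congrArg List.length heq
  unfold convert_table_array_to_dict convert_table_array_to_dict_alt at hlen
  simp only [PySem.List.foldl_append_singleton_eq_map, List.length_map, List.nil_append,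
    PySem.List.length_pyRange_one] at hlen
  rw [pv_B_len table h hD] at hlen
  omega
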